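-- pv_equiv track=rewrite | github.com/lissity/AoC | 2019/Day04/main.py | check_adjacent_digits_version_2
-- ===== SOURCE A (Python) =====
-- def check_adjacent_digits_version_2(num):
--     pair_found = False
--     for i in range(len(num)-1):
--         if(num[i] == num[i+1]):         # Pair was found
--             # Check if the pair is not part of a largers group of matching digits
--             if(not (i-1 >= 0 and num[i-1] == num[i]) and not (i+2 < len(num) and num[i+2] == num[i])):
--                pair_found = True
--                break
--     return pair_found
-- ===== SOURCE B (Python) =====
-- def check_adjacent_digits_version_2(num):
--     # Scan maximal runs of equal characters; a run of length exactly 2 is a pair.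
--     i, n = 0, len(num)
--     while i < n:
--         j = i
--         while j < n and num[j] == num[i]:
--             j += 1
--         if j - i == 2:
--             return True
--         i = j
--     return False
-- ===== Notes on version B (the rewrite author's own statement) =====
-- stated objective: alternative
-- what changed: Replaced the sliding-window scan with look-behind/look-ahead neighbour tests by a run-length scan that partitions the string into maximal runs of equal characters and succeeds on the first run of length exactly 2.
import Mathlib
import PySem

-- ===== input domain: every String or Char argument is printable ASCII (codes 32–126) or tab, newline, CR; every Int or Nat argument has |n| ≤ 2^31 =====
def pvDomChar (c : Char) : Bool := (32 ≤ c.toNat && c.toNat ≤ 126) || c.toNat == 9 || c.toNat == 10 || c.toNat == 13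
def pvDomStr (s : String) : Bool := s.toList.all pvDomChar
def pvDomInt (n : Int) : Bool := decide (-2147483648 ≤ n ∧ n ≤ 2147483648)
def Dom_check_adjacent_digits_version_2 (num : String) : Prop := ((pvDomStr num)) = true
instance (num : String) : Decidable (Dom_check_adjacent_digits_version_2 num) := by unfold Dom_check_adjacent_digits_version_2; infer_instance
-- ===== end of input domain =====

-- B replaces A's sliding-window neighbour tests by a maximal-run scan; same O(n) cost (objective: alternative).

-- ===== PORT A =====
-- A's for-loop with break, iterating i over range(len(num)-1); all index accesses are
-- guarded in range by the loop bound and the explicit i-1/i+2 checks, so getD is exact.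
def pvLoopA (l : List Char) : List Nat → Bool
  | [] => false
  | i :: rest =>
    if l.getD i ' ' = l.getD (i+1) ' ' then
      if (!(decide (1 ≤ i) && decide (l.getD (i-1) ' ' = l.getD i ' '))) &&
         (!(decide (i+2 < l.length) && decide (l.getD (i+2) ' ' = l.getD i ' '))) then
        true
      else pvLoopA l rest
    else pvLoopA l rest

def check_adjacent_digits_version_2 (num : String) : Bool :=
  pvLoopA num.toList (List.range (num.toList.length - 1))

-- ===== PORT B =====
-- inner while: number of further characters equal to c at the front, plus the remainder
def pvRunLen (c : Char) : List Char → Nat × List Char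
  | [] => (0, [])
  | d :: rest =>
    if d = c then
      let p := pvRunLen c rest
      (p.1 + 1, p.2)
    else (0, d :: rest)

theorem pvRunLen_len (c : Char) (l : List Char) : (pvRunLen c l).2.length ≤ l.length := by
  induction l with
  | nil => simp [pvRunLen]
  | cons d rest ih =>
    by_cases h : d = c
    · simp [pvRunLen, h]; omega
    · simp [pvRunLen, h]

-- outer while: drop each maximal run, succeed when one has length exactly 2
def pvHasRun2 : List Char → Bool
  | [] => false
  | c :: rest =>
    let p := pvRunLen c rest
    if p.1 + 1 = 2 then true else pvHasRun2 p.2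
termination_by l => l.length
decreasing_by
  exact Nat.lt_succ_of_le (pvRunLen_len c rest)

def check_adjacent_digits_version_2_alt (num : String) : Bool :=
  pvHasRun2 num.toList

-- ===== PRECONDITION & SPEC =====
def Spec_check_adjacent_digits_version_2 (num : String) (out : Bool) : Prop := out = check_adjacent_digits_version_2_alt num
instance (num : String) (out : Bool) : Decidable (Spec_check_adjacent_digits_version_2 num out) := by unfold Spec_check_adjacent_digits_version_2; infer_instance

-- ===== CLAIM (what is proved, stated in full; the proofs are below) =====
def Claim_equal_check_adjacent_digits_version_2 : Prop := ∀ (num : String), Dom_check_adjacent_digits_version_2 num → Spec_check_adjacent_digits_version_2 num (check_adjacent_digits_version_2 num)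

-- ===== LEMMAS AND PROOFS =====

theorem pvIfOr (c1 : Prop) [Decidable c1] (c2 x : Bool) :
    (if c1 then (if c2 then true else x) else x) = ((decide c1 && c2) || x) := by
  by_cases h : c1 <;> cases c2 <;> simp [h]

-- A's per-index condition, named for the proofs
def pvQ (l : List Char) (i : Nat) : Bool :=
  decide (l.getD i ' ' = l.getD (i+1) ' ') &&
  ((!(decide (1 ≤ i) && decide (l.getD (i-1) ' ' = l.getD i ' '))) &&
   (!(decide (i+2 < l.length) && decide (l.getD (i+2) ' ' = l.getD i ' '))))

theorem pvLoopA_any (l : List Char) (idxs : List Nat) :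
    pvLoopA l idxs = idxs.any (pvQ l) := by
  induction idxs with
  | nil => simp [pvLoopA]
  | cons i rest ih =>
    simp only [pvLoopA, List.any_cons]
    rw [pvIfOr, ih, pvQ]

theorem pvA_exists_bool (l : List Char) :
    pvLoopA l (List.range (l.length - 1)) = decide (∃ i < l.length - 1, pvQ l i = true) := by
  rw [pvLoopA_any, Bool.eq_iff_iff]
  simp [List.any_eq_true]

-- structure of pvRunLen: the consumed prefix is a run of c and the remainder cannot extend it
theorem pvRunLen_spec (c : Char) (l : List Char) :
    l = List.replicate (pvRunLen c l).1 c ++ (pvRunLen c l).2 ∧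
      ∀ d, (pvRunLen c l).2.head? = some d → d ≠ c := by
  induction l with
  | nil => simp [pvRunLen]
  | cons d rest ih =>
    by_cases h : d = c
    · subst h
      simp only [pvRunLen]
      refine ⟨?_, ih.2⟩
      conv_lhs => rw [ih.1]
      simp [List.replicate_succ]
    · simp [pvRunLen, h]

-- getD of a run-prefixed list, shifted past the run
theorem getD_shift (k : Nat) (c : Char) (r : List Char) (j : Nat) :
    (List.replicate k c ++ r).getD (k + j) ' ' = r.getD j ' ' := by
  simp [List.getD_eq_getElem?_getD, List.getElem?_append_right (by simp : (List.replicate k c).length ≤ k + j)]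

theorem getD_run (k : Nat) (c : Char) (r : List Char) (j : Nat) (hj : j < k) :
    (List.replicate k c ++ r).getD j ' ' = c := by
  rw [List.getD_eq_getElem?_getD, List.getElem?_append_left (show j < (List.replicate k c).length by simpa using hj)]
  simp [hj]

-- pvQ is invariant under dropping a whole maximal run
theorem pvQ_shift (k : Nat) (c : Char) (r : List Char) (j : Nat)
    (hr : ∀ d, r.head? = some d → d ≠ c) (hk : 1 ≤ k) (hj : j + 2 ≤ r.length) :
    pvQ (List.replicate k c ++ r) (k + j) = pvQ r j := by
  have hlen : (List.replicate k c ++ r).length = k + r.length := by simp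
  have h0 : (List.replicate k c ++ r).getD (k + j) ' ' = r.getD j ' ' := getD_shift k c r j
  have h1 : (List.replicate k c ++ r).getD (k + j + 1) ' ' = r.getD (j + 1) ' ' := by
    rw [show k + j + 1 = k + (j + 1) by omega]; exact getD_shift k c r (j+1)
  have h2 : (List.replicate k c ++ r).getD (k + j + 2) ' ' = r.getD (j + 2) ' ' := by
    rw [show k + j + 2 = k + (j + 2) by omega]; exact getD_shift k c r (j+2)
  unfold pvQ
  cases j with
  | zero =>
    obtain ⟨d, rr, rfl⟩ : ∃ d rr, r = d :: rr := by
      cases r with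
      | nil => simp at hj
      | cons d rr => exact ⟨d, rr, rfl⟩
    have hdc : d ≠ c := hr d rfl
    have hcd : ¬ (c = d) := fun h => hdc h.symm
    have hkm : (List.replicate k c ++ d :: rr).getD (k - 1) ' ' = c :=
      getD_run k c _ (k-1) (by omega)
    have hd0 : (d :: rr).getD 0 ' ' = d := rfl
    rw [h0, h1, h2, show k + 0 - 1 = k - 1 by omega, hkm]
    simp [hcd, hk, hlen, show k + 0 + 2 < k + (rr.length + 1) ↔ 0 + 2 < rr.length + 1 by omega]
  | succ j' =>
    have hm1 : (List.replicate k c ++ r).getD (k + (j' + 1) - 1) ' ' = r.getD (j' + 1 - 1) ' ' := by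
      rw [show k + (j' + 1) - 1 = k + j' by omega, show j' + 1 - 1 = j' by omega]
      exact getD_shift k c r j'
    simp only [h0, h1, h2, hm1, hlen]
    simp [show 1 ≤ k + (j' + 1) by omega,
      show k + (j' + 1) + 2 < k + r.length ↔ j' + 1 + 2 < r.length by omega]

-- pvQ inside the leading run: an index of the run below the last valid window position
-- qualifies iff the run has length exactly 2
theorem pvQ_run (k : Nat) (c : Char) (r : List Char)
    (hr : ∀ d, r.head? = some d → d ≠ c) (hk : 1 ≤ k) :
    (∃ i, i < k ∧ i + 1 < k + r.length ∧ pvQ (List.replicate k c ++ r) i = true) ↔ k = 2 := by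
  set l := List.replicate k c ++ r with hl
  have hlen : l.length = k + r.length := by simp [hl]
  constructor
  · rintro ⟨i, hik, hib, hq⟩
    unfold pvQ at hq
    simp only [Bool.and_eq_true, Bool.not_eq_true', Bool.and_eq_false_iff, decide_eq_true_eq,
      decide_eq_false_iff_not] at hq
    obtain ⟨hpair, hleft, hright⟩ := hq
    have hgi : l.getD i ' ' = c := getD_run k c r i hik
    -- the (i+1)-st character is in range; a true pair forces it inside the run
    have hik1 : i + 1 < k := by
      by_contra hge
      have hik1 : i + 1 = k := by omega
      obtain ⟨d, rr, hre⟩ : ∃ d rr, r = d :: rr := by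
        cases r with
        | nil => simp at hib; omega
        | cons d rr => exact ⟨d, rr, rfl⟩
      have hdc := hr d (by rw [hre]; rfl)
      have hgi1 : l.getD (i+1) ' ' = d := by
        rw [hik1, hl, hre]
        have := getD_shift k c (d :: rr) 0; simpa using this
      rw [hgi, hgi1] at hpair
      exact hdc hpair.symm
    have hi0 : i = 0 := by
      rcases hleft with h | h
      · omega
      · by_contra hne
        have : l.getD (i-1) ' ' = c := getD_run k c r (i-1) (by omega)
        simp_all
    subst hi0
    have hk2 : 2 ≤ k := by omega
    by_contra hne
    have hk3 : 3 ≤ k := by omega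
    have h2 : l.getD 2 ' ' = c := getD_run k c r 2 (by omega)
    rcases hright with h | h
    · rw [hlen] at h; omega
    · simp_all
  · intro hk2
    subst hk2
    refine ⟨0, by omega, by omega, ?_⟩
    have h0 : l.getD 0 ' ' = c := getD_run 2 c r 0 (by omega)
    have h1 : l.getD 1 ' ' = c := getD_run 2 c r 1 (by omega)
    unfold pvQ
    simp only [show (0:ℕ)+1 = 1 from rfl, show (0:ℕ)+2 = 2 from rfl, show (0:ℕ)-1 = 0 from rfl]
    rw [h0, h1]
    cases r with
    | nil =>
      simp [hlen]
    | cons d rr =>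
      have hdc := hr d rfl
      have h2 : l.getD 2 ' ' = d := by
        have := getD_shift 2 c (d :: rr) 0; simpa [hl] using this
      rw [h2]
      simp [hdc, hlen]

-- no pair straddles the run boundary
theorem pvQ_boundary (k : Nat) (c : Char) (r : List Char)
    (hr : ∀ d, r.head? = some d → d ≠ c) (hk : 1 ≤ k)
    (hb : k - 1 < (List.replicate k c ++ r).length - 1) :
    pvQ (List.replicate k c ++ r) (k - 1) = false := by
  have hlen : (List.replicate k c ++ r).length = k + r.length := by simp
  cases r with
  | nil => simp at hb
  | cons d rr =>
    have hdc := hr d rfl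
    have h0 : (List.replicate k c ++ d :: rr).getD (k-1) ' ' = c := getD_run k c _ (k-1) (by omega)
    have h1 : (List.replicate k c ++ d :: rr).getD k ' ' = d := by
      have := getD_shift k c (d :: rr) 0; simpa using this
    have hcd : ¬ (c = d) := fun h => hdc h.symm
    unfold pvQ
    rw [show k - 1 + 1 = k by omega, h0, h1]
    simp [hcd]

-- main characterisation of A's loop, by strong induction over run removal
theorem pvA_eq_hasRun2 (l : List Char) :
    pvLoopA l (List.range (l.length - 1)) = pvHasRun2 l := by
  induction hn : l.length using Nat.strong_induction_on generalizing l with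
  | _ n ih =>
  cases l with
  | nil => subst hn; simp [pvLoopA, pvHasRun2]
  | cons c rest =>
    subst hn
    obtain ⟨hdec, hhead⟩ := pvRunLen_spec c rest
    set k := (pvRunLen c rest).1 with hkdef
    set r := (pvRunLen c rest).2 with hrdef
    have hlform : c :: rest = List.replicate (k+1) c ++ r := by
      rw [List.replicate_succ, List.cons_append]; exact congrArg (c :: ·) hdec
    have hrlen : r.length ≤ rest.length := pvRunLen_len c rest
    have hlen : (c :: rest).length = (k+1) + r.length := by rw [hlform]; simp
    have hB : pvHasRun2 (c :: rest) = if k + 1 = 2 then true else pvHasRun2 r := by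
      rw [pvHasRun2]
    rw [hB, hlform, pvA_exists_bool]
    have hexp :
        (∃ i < (List.replicate (k+1) c ++ r).length - 1, pvQ (List.replicate (k+1) c ++ r) i = true)
        ↔ (k + 1 = 2 ∨ ∃ j < r.length - 1, pvQ r j = true) := by
      have hL : (List.replicate (k+1) c ++ r).length = (k+1) + r.length := by simp
      constructor
      · rintro ⟨i, hi, hq⟩
        by_cases hik : i < k + 1
        · left
          exact (pvQ_run (k+1) c r hhead (by omega)).mp ⟨i, hik, by omega, hq⟩
        · by_cases hib : i = k + 1 - 1
          · exfalso; rw [hib] at hq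
            rw [pvQ_boundary (k+1) c r hhead (by omega) (by omega)] at hq
            exact Bool.false_ne_true hq
          · right
            refine ⟨i - (k+1), by omega, ?_⟩
            rw [← pvQ_shift (k+1) c r (i - (k+1)) hhead (by omega) (by omega)]
            rw [show k + 1 + (i - (k+1)) = i by omega]
            exact hq
      · rintro (hk2 | ⟨j, hj, hq⟩)
        · obtain ⟨i, hik, hib, hq⟩ := (pvQ_run (k+1) c r hhead (by omega)).mpr hk2
          exact ⟨i, by omega, hq⟩
        · refine ⟨(k+1) + j, by omega, ?_⟩
          rw [pvQ_shift (k+1) c r j hhead (by omega) (by omega)]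
          exact hq
    have hIH : pvLoopA r (List.range (r.length - 1)) = pvHasRun2 r := by
      have : r.length < (c :: rest).length := by omega
      exact ih r.length this r rfl
    by_cases hk2 : k + 1 = 2
    · simp only [if_pos hk2, decide_eq_true_eq]
      exact hexp.mpr (Or.inl hk2)
    · simp only [if_neg hk2]
      rw [← hIH, pvA_exists_bool, decide_eq_decide]
      exact hexp.trans (by simp [hk2])

-- ===== VERDICT (by name: the statement is the Claim_ definition above) =====
theorem check_adjacent_digits_version_2_spec : Claim_equal_check_adjacent_digits_version_2 := by
  intro num _
  unfold Spec_check_adjacent_digits_version_2 check_adjacent_digits_version_2 check_adjacent_digits_version_2_alt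
  exact pvA_eq_hasRun2 num.toList
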